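-- pv_equiv track=rewrite | github.com/vainField/mit6.009_sp21 | lab6.py | room_with_capacity
-- ===== SOURCE A (Python) =====
-- def room_with_capacity(n, room, students):
--     """
--     >>> students = ['Alice', 'Bob', 'Charles']
--     >>> room = 'basement'
--     >>> n = 1
--     >>> [i for i in room_with_capacity(n, room, students)]
--     [[('Alice_basement', False), ('Bob_basement', False)], [('Alice_basement', False), ('Charles_basement', False)], [('Bob_basement', False), ('Charles_basement', False)]]
--     """
--     all_literals = [(f'{student}_{room}', False) for student in students]
--     num_student = len(students)
--     if n == 0:   ## no capacity
--         for literal in all_literals: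
--             yield [literal]
--     if n >= len(students):   ## room capacity larger than student number
--         return []
--     if n < 0:   ## stop iteration
--         return
--
--     for sub_clause in room_with_capacity(n-1, room, students):   ## recursion
--         index = all_literals.index(sub_clause[-1]) + 1
--         if index <= num_student:
--             for literal in all_literals[index:]:
--                 clause = sub_clause + [literal]
--                 yield clause
-- ===== SOURCE B (Python) =====
-- def room_with_capacity(n, room, students):
--     """Top-down structural recursion over the literal list (lex combinations),
--     instead of A's bottom-up level building with a list.index scan."""
--     literals = [(student + '_' + room, False) for student in students]
--     if n < 0 or n >= len(students):
--         return []
--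
--     def combs(k, xs):
--         if k == 0:
--             return [[]]
--         if not xs:
--             return []
--         head, rest = xs[0], xs[1:]
--         return [[head] + tail for tail in combs(k - 1, rest)] + combs(k, rest)
--
--     return combs(n + 1, literals)
-- ===== Notes on version B (the rewrite author's own statement) =====
-- stated objective: alternative
-- what changed: A builds clause level n from level n-1 bottom-up, re-finding each clause's last literal with list.index and extending by every later literal; B generates the (n+1)-combinations directly by one top-down structural recursion on the literal list (with x / without x), with no index scan and no level-by-level rebuilding.
import Mathlib
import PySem

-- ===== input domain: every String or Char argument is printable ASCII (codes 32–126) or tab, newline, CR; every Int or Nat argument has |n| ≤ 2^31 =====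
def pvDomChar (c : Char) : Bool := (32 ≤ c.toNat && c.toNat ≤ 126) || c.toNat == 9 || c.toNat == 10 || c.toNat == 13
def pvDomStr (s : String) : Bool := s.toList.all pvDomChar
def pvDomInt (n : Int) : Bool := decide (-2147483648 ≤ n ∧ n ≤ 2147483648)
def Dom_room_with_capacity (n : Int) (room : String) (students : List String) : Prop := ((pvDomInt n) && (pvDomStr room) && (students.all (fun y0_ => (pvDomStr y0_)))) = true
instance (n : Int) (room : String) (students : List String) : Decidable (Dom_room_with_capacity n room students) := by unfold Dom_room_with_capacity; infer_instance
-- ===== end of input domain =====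

-- B replaces A's bottom-up level building (extend each (n)-clause by every literal after a
-- list.index scan for its last element) with one top-down structural recursion over the literal
-- list (objective: alternative/simpler; return value only — A is a generator, compared as the
-- list of its yielded values).

-- ===== PORT A =====
-- Literal transliteration of A. The generator's yields are collected in order; the two `match`
-- `none` arms are the inputs where Python would raise (IndexError on sub_clause[-1] of an empty
-- clause / ValueError on a failed .index) — both are unreachable, since every yielded clause is
-- nonempty and ends with an element of all_literals.
def room_with_capacity (n : Int) (room : String) (students : List String) : List (List (String × Bool)) :=
  let all_literals := students.map (fun student => (student ++ "_" ++ room, false))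
  let num_student : Int := students.length
  let base := if n = 0 then all_literals.map (fun literal => [literal]) else []
  if _h1 : n ≥ num_student then base
  else if _h2 : n < 0 then base
  else
    base ++ (room_with_capacity (n - 1) room students).flatMap (fun sub_clause =>
      match PySem.List.pyGet? sub_clause (-1) with
      | none => []       -- Python: IndexError (unreachable)
      | some last =>
        match PySem.List.index? all_literals last with
        | none => []     -- Python: ValueError (unreachable)
        | some i =>
          let index : Int := (i : Int) + 1
          if index ≤ num_student then
            (PySem.List.slice all_literals (some index) none).map (fun literal => sub_clause ++ [literal])
          else [])
termination_by (n + 1).toNat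
decreasing_by simp only [num_student] at _h1; omega

-- ===== PORT B =====
-- Source B's inner `combs(k, xs)`: k == 0 → [[]]; empty xs → []; else combinations containing
-- xs[0] (head-cons over combs (k-1) rest) followed by those that do not (combs k rest).
def pvCombsB : Nat → List (String × Bool) → List (List (String × Bool))
  | 0, _ => [[]]
  | _ + 1, [] => []
  | k + 1, x :: xs => (pvCombsB k xs).map (fun tail => x :: tail) ++ pvCombsB (k + 1) xs

def room_with_capacity_alt (n : Int) (room : String) (students : List String) : List (List (String × Bool)) :=
  let literals := students.map (fun student => (student ++ "_" ++ room, false))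
  if n < 0 ∨ n ≥ (students.length : Int) then []
  else pvCombsB (n + 1).toNat literals

-- ===== PRECONDITION & SPEC =====
-- Pre_ excludes lists with duplicate student names in the only case any clause is produced
-- (0 ≤ n < len(students)): there A's `.index`-first-match extension duplicates and mis-orders
-- clauses — an accident of its implementation that is as defensible as B's once-per-combination
-- behaviour (duplicate literals make the combination order unspecified).
def Pre_room_with_capacity (n : Int) (room : String) (students : List String) : Prop :=
  students.Nodup ∨ n < 0 ∨ (students.length : Int) ≤ n
instance (n : Int) (room : String) (students : List String) : Decidable (Pre_room_with_capacity n room students) := by unfold Pre_room_with_capacity; infer_instance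

def pvWitness_room_with_capacity : Int × String × List String := (1, "r", ["A", "B", "C"])

def Spec_room_with_capacity (n : Int) (room : String) (students : List String) (out : List (List (String × Bool))) : Prop := out = room_with_capacity_alt n room students
instance (n : Int) (room : String) (students : List String) (out : List (List (String × Bool))) : Decidable (Spec_room_with_capacity n room students out) := by unfold Spec_room_with_capacity; infer_instance

-- ===== CLAIM (what is proved, stated in full; the proofs are below) =====
def Claim_equal_room_with_capacity : Prop := ∀ (n : Int) (room : String) (students : List String), Dom_room_with_capacity n room students → Pre_room_with_capacity n room students → Spec_room_with_capacity n room students (room_with_capacity n room students)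

-- ===== LEMMAS AND PROOFS =====

-- A's extension of one sub-clause, as a named function of the literal list (identical to the
-- flatMap body of the port, with num_student rewritten to the literal list's length).
def pvExt (L : List (String × Bool)) (sub : List (String × Bool)) : List (List (String × Bool)) :=
  match PySem.List.pyGet? sub (-1) with
  | none => []
  | some last =>
    match PySem.List.index? L last with
    | none => []
    | some i =>
      if (i : Int) + 1 ≤ (L.length : Int) then
        (PySem.List.slice L (some ((i : Int) + 1)) none).map (fun literal => sub ++ [literal])
      else []

theorem pvCombsB_length : ∀ (k : Nat) (xs : List (String × Bool)) (t : List (String × Bool)),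
    t ∈ pvCombsB k xs → t.length = k := by
  intro k xs
  induction xs generalizing k with
  | nil => cases k <;> simp [pvCombsB]
  | cons x rest ih =>
    cases k with
    | zero => simp [pvCombsB]
    | succ j =>
      intro t ht
      simp only [pvCombsB, List.mem_append, List.mem_map] at ht
      rcases ht with ⟨u, hu, rfl⟩ | ht
      · simp [ih j u hu]
      · exact ih (j + 1) t ht

theorem pvCombsB_subset : ∀ (k : Nat) (xs : List (String × Bool)) (t : List (String × Bool)),
    t ∈ pvCombsB k xs → ∀ a ∈ t, a ∈ xs := by
  intro k xs
  induction xs generalizing k with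
  | nil => cases k <;> simp [pvCombsB]
  | cons x rest ih =>
    cases k with
    | zero => simp [pvCombsB]
    | succ j =>
      intro t ht a ha
      simp only [pvCombsB, List.mem_append, List.mem_map] at ht
      rcases ht with ⟨u, hu, rfl⟩ | ht
      · simp only [List.mem_cons] at ha ⊢
        rcases ha with rfl | ha
        · exact Or.inl rfl
        · exact Or.inr (ih j u hu a ha)
      · exact List.mem_cons_of_mem _ (ih (j + 1) t ht a ha)

theorem pvCombsB_one (xs : List (String × Bool)) : pvCombsB 1 xs = xs.map (fun x => [x]) := by
  induction xs with
  | nil => simp [pvCombsB]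
  | cons x rest ih => simp [pvCombsB, ih]

-- pvExt ignores a fresh head of the literal list on a nonempty clause over the tail.
theorem pvExt_cons (x : String × Bool) (xs : List (String × Bool)) (sub : List (String × Bool))
    (hx : x ∉ xs) (hne : sub ≠ []) (hmem : ∀ a ∈ sub, a ∈ xs) :
    pvExt (x :: xs) sub = pvExt xs sub := by
  have hlast : sub.getLast? = some (sub.getLast hne) := List.getLast?_eq_some_getLast hne
  have hmem' : sub.getLast hne ∈ xs := hmem _ (List.getLast_mem hne)
  have hxl : x ≠ sub.getLast hne := fun h => hx (h ▸ hmem')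
  obtain ⟨i, hi⟩ := Option.isSome_iff_exists.mp ((PySem.List.index?_isSome_iff xs _).mpr hmem')
  obtain ⟨hk, -, -⟩ := PySem.List.getElem_of_index?_eq_some hi
  unfold pvExt
  rw [PySem.List.pyGet?_neg_one, hlast]
  dsimp only
  rw [PySem.List.index?_cons_of_ne xs hxl, hi]
  simp only [Option.map_some]
  rw [if_pos (by simp; omega), if_pos (by simp; omega)]
  rw [PySem.List.slice_from (x :: xs) (by positivity), PySem.List.slice_from xs (by positivity)]
  have h1 : ((((i + 1 : Nat) : Int) + 1)).toNat = i + 2 := by omega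
  have h2 : (((i : Nat) : Int) + 1).toNat = i + 1 := by omega
  rw [h1, h2]
  rfl

-- pvExt on a clause headed by the fresh head x: extend the tail clause, cons x back.
theorem pvExt_cons_head (x : String × Bool) (xs : List (String × Bool)) (t : List (String × Bool))
    (hx : x ∉ xs) (ht : t ≠ []) (hmem : ∀ a ∈ t, a ∈ xs) :
    pvExt (x :: xs) (x :: t) = (pvExt xs t).map (fun u => x :: u) := by
  have hlast : t.getLast? = some (t.getLast ht) := List.getLast?_eq_some_getLast ht
  have hlast2 : (x :: t).getLast? = some (t.getLast ht) := by
    cases t with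
    | nil => exact absurd rfl ht
    | cons a b => rw [List.getLast?_cons_cons]; exact hlast
  have hmem' : t.getLast ht ∈ xs := hmem _ (List.getLast_mem ht)
  have hxl : x ≠ t.getLast ht := fun h => hx (h ▸ hmem')
  obtain ⟨i, hi⟩ := Option.isSome_iff_exists.mp ((PySem.List.index?_isSome_iff xs _).mpr hmem')
  obtain ⟨hk, -, -⟩ := PySem.List.getElem_of_index?_eq_some hi
  unfold pvExt
  rw [PySem.List.pyGet?_neg_one, PySem.List.pyGet?_neg_one, hlast, hlast2]
  dsimp only
  rw [PySem.List.index?_cons_of_ne xs hxl, hi]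
  simp only [Option.map_some]
  rw [if_pos (by simp; omega), if_pos (by simp; omega)]
  rw [PySem.List.slice_from (x :: xs) (by positivity), PySem.List.slice_from xs (by positivity)]
  have h1 : (((i + 1 : Nat) : Int) + 1).toNat = i + 2 := by omega
  have h2 : (((i : Nat) : Int) + 1).toNat = i + 1 := by omega
  rw [h1, h2]
  simp [List.map_map, Function.comp_def]

theorem pvExt_singleton_head (x : String × Bool) (xs : List (String × Bool)) :
    pvExt (x :: xs) [x] = xs.map (fun y => [x, y]) := by
  unfold pvExt
  rw [PySem.List.pyGet?_neg_one]
  have h1 : ([x] : List (String × Bool)).getLast? = some x := rfl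
  rw [h1]
  dsimp only
  rw [PySem.List.index?_cons_self]
  dsimp only
  rw [if_pos (by simp)]
  rw [PySem.List.slice_from (x :: xs) (by norm_num)]
  norm_num

-- The crux: extending every k+1-combination by each later literal gives the k+2-combinations.
theorem pvExt_flatMap (k : Nat) (xs : List (String × Bool)) (h : xs.Nodup) :
    (pvCombsB (k + 1) xs).flatMap (pvExt xs) = pvCombsB (k + 2) xs := by
  induction xs generalizing k with
  | nil => simp [pvCombsB]
  | cons x rest ih =>
    rcases List.nodup_cons.mp h with ⟨hx, hrest⟩
    simp only [pvCombsB, List.flatMap_append, List.flatMap_map]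
    have h2 : (pvCombsB (k + 1) rest).flatMap (pvExt (x :: rest)) = pvCombsB (k + 2) rest := by
      rw [List.flatMap_congr (g := pvExt rest) ?_]
      · exact ih k hrest
      · intro t htm
        exact pvExt_cons x rest t hx
          (by have := pvCombsB_length (k + 1) rest t htm; intro hn; simp [hn] at this)
          (pvCombsB_subset (k + 1) rest t htm)
    rw [h2]
    cases k with
    | zero =>
      simp only [pvCombsB, List.flatMap_cons, List.flatMap_nil, List.append_nil]
      rw [pvExt_singleton_head x rest, pvCombsB_one]
      simp [List.map_map, Function.comp_def]
    | succ j =>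
      have h1 : (pvCombsB (j + 1) rest).flatMap (fun a => pvExt (x :: rest) (x :: a))
          = (pvCombsB (j + 2) rest).map (fun u => x :: u) := by
        rw [List.flatMap_congr (g := fun a => (pvExt rest a).map (fun u => x :: u)) ?_]
        · rw [← List.map_flatMap, ih j hrest]
        · intro t htm
          exact pvExt_cons_head x rest t hx
            (by have := pvCombsB_length (j + 1) rest t htm; intro hn; simp [hn] at this)
            (pvCombsB_subset (j + 1) rest t htm)
      rw [h1]

theorem roomA_neg (n : Int) (room : String) (students : List String) (hn : n < 0) :
    room_with_capacity n room students = [] := by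
  rw [room_with_capacity]
  have : ¬ n ≥ (students.length : Int) := by omega
  simp [this, hn, if_neg (by omega : ¬ n = 0)]

theorem roomA_eq_combs : ∀ (k : Nat) (room : String) (students : List String),
    (students.map (fun student => (student ++ "_" ++ room, false))).Nodup →
    (k : Int) < (students.length : Int) →
    room_with_capacity (k : Int) room students
      = pvCombsB (k + 1) (students.map (fun student => (student ++ "_" ++ room, false))) := by
  intro k
  induction k with
  | zero =>
    intro room students hnd hk
    rw [room_with_capacity]
    simp only [Nat.cast_zero]
    rw [dif_neg (by omega), dif_neg (by omega)]
    simp only [if_true]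
    rw [show (0 : Int) - 1 = -1 from by norm_num, roomA_neg _ _ _ (by norm_num)]
    simp [pvCombsB_one]
  | succ j ih =>
    intro room students hnd hk
    rw [room_with_capacity]
    simp only
    rw [dif_neg (by omega), dif_neg (by omega), if_neg (by omega)]
    rw [show ((j + 1 : Nat) : Int) - 1 = (j : Int) from by push_cast; ring]
    rw [ih room students hnd (by omega)]
    simp only [List.nil_append]
    have hbody : (fun sub_clause => match PySem.List.pyGet? sub_clause (-1) with
        | none => ([] : List (List (String × Bool)))
        | some last =>
          match PySem.List.index? (students.map (fun student => (student ++ "_" ++ room, false))) last with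
          | none => []
          | some i =>
            if (i : Int) + 1 ≤ (students.length : Int) then
              (PySem.List.slice (students.map (fun student => (student ++ "_" ++ room, false))) (some ((i : Int) + 1)) none).map
                (fun literal => sub_clause ++ [literal])
            else [])
        = pvExt (students.map (fun student => (student ++ "_" ++ room, false))) := by
      funext sub
      simp only [pvExt, List.length_map]
    rw [hbody, pvExt_flatMap j _ hnd]

theorem room_with_capacity_spec : Claim_equal_room_with_capacity := by
  intro n room students _hdom hpre
  unfold Spec_room_with_capacity
  by_cases hneg : n < 0
  · rw [roomA_neg _ _ _ hneg, room_with_capacity_alt]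
    rw [if_pos (Or.inl hneg)]
  · by_cases hge : (students.length : Int) ≤ n
    · rw [room_with_capacity_alt, if_pos (Or.inr hge)]
      rw [room_with_capacity]
      rw [dif_pos hge]
      by_cases hn0 : n = 0
      · have : students = [] := List.length_eq_zero_iff.mp (by omega)
        subst this
        simp [hn0]
      · simp [hn0]
    · have hnd : (students.map (fun student => (student ++ "_" ++ room, false))).Nodup := by
        refine List.Nodup.map ?_ (hpre.resolve_right (by omega))
        intro a b hab
        have h1 : a ++ "_" ++ room = b ++ "_" ++ room := congrArg Prod.fst hab
        exact (String.append_left_inj "_").mp ((String.append_left_inj room).mp h1)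
      have hk : n = ((n.toNat : Nat) : Int) := by omega
      rw [room_with_capacity_alt, if_neg (by omega)]
      rw [hk, roomA_eq_combs n.toNat room students hnd (by omega)]
      congr 1
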